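-- pv_equiv track=rewrite | github.com/OldyG/vibe | mcp-java-indexer/java-analyzer/parser/formatters.py | _is_in_scope
-- ===== SOURCE A (Python) =====
-- from typing import Dict, List, Any, Optional
--
-- def _is_in_scope(modifiers: List[str], scope: str) -> bool:
--     """
--     접근 제한자 필터링
--
--     Args:
--         modifiers: 접근 제한자 리스트 (예: ["public", "static"])
--         scope: 필터링 범위 ("all", "public", "protected", "private")
--
--     Returns:
--         해당 scope에 포함되는지 여부
--     """
--     if scope == "all":
--         return True
--
--     scope_levels = {
--         "public": ["public"],
--         "protected": ["public", "protected"],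
--         "private": ["public", "protected", "private"]
--     }
--
--     allowed = scope_levels.get(scope, ["public", "protected", "private"])
--
--     for modifier in modifiers:
--         if modifier in allowed:
--             return True
--
--     # modifier가 없으면 package-private → protected로 취급
--     if not any(m in ["public", "protected", "private"] for m in modifiers):
--         return "protected" in allowed
--
--     return False
-- ===== SOURCE B (Python) =====
-- def _is_in_scope(modifiers, scope):
--     if scope == "all":
--         return True
--     RANK = {"public": 1, "protected": 2, "private": 3}
--     scope_rank = RANK.get(scope, 3)
--     ranks = [RANK[m] for m in modifiers if m in RANK]
--     return min(ranks, default=2) <= scope_rank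
-- ===== Notes on version B (the rewrite author's own statement) =====
-- stated objective: simpler
-- what changed: Replaces the allowed-list membership loop plus the any(...) package-private fallback with numeric visibility ranks: the minimum rank of the access modifiers present (default 2 = package-private treated as protected) is compared against a per-scope threshold (unknown scope -> 3, allowing all).
import Mathlib
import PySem

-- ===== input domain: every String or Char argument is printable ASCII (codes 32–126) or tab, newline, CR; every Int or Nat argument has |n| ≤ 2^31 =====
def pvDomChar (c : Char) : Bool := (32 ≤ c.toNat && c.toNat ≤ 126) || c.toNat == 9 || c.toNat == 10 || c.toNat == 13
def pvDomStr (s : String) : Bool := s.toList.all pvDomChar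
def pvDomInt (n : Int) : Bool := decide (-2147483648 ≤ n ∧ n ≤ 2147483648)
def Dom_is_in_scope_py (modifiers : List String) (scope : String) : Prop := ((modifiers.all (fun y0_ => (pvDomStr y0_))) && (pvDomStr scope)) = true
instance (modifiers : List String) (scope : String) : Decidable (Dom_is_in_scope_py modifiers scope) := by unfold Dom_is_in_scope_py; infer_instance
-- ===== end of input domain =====

-- B replaces A's allowed-list membership loop and package-private fallback by a single
-- numeric-rank threshold comparison (objective: simpler); both are total, exact equivalence proved.

-- ===== PORT A =====
def is_in_scope_py (modifiers : List String) (scope : String) : Bool :=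
  if scope == "all" then true
  else
    let scope_levels : PySem.Dict String (List String) :=
      PySem.Dict.ofList
        [("public", ["public"]),
         ("protected", ["public", "protected"]),
         ("private", ["public", "protected", "private"])]
    let allowed := scope_levels.getD scope ["public", "protected", "private"]
    -- 'for modifier in modifiers: if modifier in allowed: return True' = List.any
    if modifiers.any (fun modifier => allowed.contains modifier) then true
    else if !(modifiers.any (fun m => (["public", "protected", "private"] : List String).contains m)) then
      allowed.contains "protected"
    else false

-- ===== PORT B =====
def is_in_scope_py_alt (modifiers : List String) (scope : String) : Bool :=
  if scope == "all" then true
  else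
    let rank : PySem.Dict String Int :=
      PySem.Dict.ofList [("public", 1), ("protected", 2), ("private", 3)]
    let scope_rank := rank.getD scope 3
    let ranks := (modifiers.filter (fun m => rank.contains m)).map (fun m => rank.getD m 0)
    -- min(ranks, default=2)
    decide ((PySem.List.min? ranks (fun x => x)).getD 2 ≤ scope_rank)

-- ===== PRECONDITION & SPEC =====
def Spec_is_in_scope_py (modifiers : List String) (scope : String) (out : Bool) : Prop := out = is_in_scope_py_alt modifiers scope
instance (modifiers : List String) (scope : String) (out : Bool) : Decidable (Spec_is_in_scope_py modifiers scope out) := by unfold Spec_is_in_scope_py; infer_instance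

-- ===== CLAIM (what is proved, stated in full; the proofs are below) =====
def Claim_equal_is_in_scope_py : Prop := ∀ (modifiers : List String) (scope : String), Dom_is_in_scope_py modifiers scope → Spec_is_in_scope_py modifiers scope (is_in_scope_py modifiers scope)

-- ===== LEMMAS AND PROOFS =====

-- The rank dictionary of B, as a literal
def pvRank : PySem.Dict String Int :=
  PySem.Dict.ofList [("public", 1), ("protected", 2), ("private", 3)]

theorem pvBeqComm (a b : String) : (a == b) = (b == a) := by
  by_cases h : a = b
  · subst h; rfl
  · simp [h, Ne.symm h]

theorem pvRank_contains (m : String) :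
    pvRank.contains m = (m == "public" || m == "protected" || m == "private") := by
  have : pvRank = PySem.Dict.mk [("public", 1), ("protected", 2), ("private", 3)] := by decide
  rw [this]
  simp only [PySem.Dict.contains_mk, List.any_cons, List.any_nil, Bool.or_false]
  rw [pvBeqComm "public" m, pvBeqComm "protected" m, pvBeqComm "private" m]
  simp [Bool.or_assoc]

-- membership in A's access-modifier literal list agrees with B's rank-dict lookup
theorem pvAccList_eq (m : String) :
    (["public", "protected", "private"] : List String).contains m = pvRank.contains m := by
  rw [pvRank_contains]
  simp only [List.contains_eq_mem]
  by_cases h1 : m = "public" <;> by_cases h2 : m = "protected" <;> by_cases h3 : m = "private" <;>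
    simp [h1, h2, h3]

-- the core equivalence, for a fixed threshold t and the corresponding allowed list
theorem pvKey (t : Int) (allowed : List String)
    (hpub : allowed.contains "public" = decide ((1 : Int) ≤ t))
    (hpro : allowed.contains "protected" = decide ((2 : Int) ≤ t))
    (hpri : allowed.contains "private" = decide ((3 : Int) ≤ t))
    (hoth : ∀ m : String, m ≠ "public" → m ≠ "protected" → m ≠ "private" → allowed.contains m = false)
    (l : List String) :
    (if l.any (fun modifier => allowed.contains modifier) then true
     else if !(l.any (fun m => (["public", "protected", "private"] : List String).contains m)) then
       allowed.contains "protected"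
     else false)
    = decide ((PySem.List.min? ((l.filter (fun m => pvRank.contains m)).map (fun m => pvRank.getD m 0)) (fun x => x)).getD 2 ≤ t) := by
  -- the effective rank of an access modifier
  have hval : ∀ m : String, pvRank.contains m = true →
      (m = "public" ∧ pvRank.getD m 0 = 1) ∨ (m = "protected" ∧ pvRank.getD m 0 = 2) ∨
      (m = "private" ∧ pvRank.getD m 0 = 3) := by
    intro m hm
    rw [pvRank_contains] at hm
    rcases Bool.or_eq_true_iff.1 hm with h | h
    · rcases Bool.or_eq_true_iff.1 h with h | h
      · exact Or.inl ⟨by simpa using h, by rw [show m = "public" by simpa using h]; decide⟩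
      · exact Or.inr (Or.inl ⟨by simpa using h, by rw [show m = "protected" by simpa using h]; decide⟩)
    · exact Or.inr (Or.inr ⟨by simpa using h, by rw [show m = "private" by simpa using h]; decide⟩)
  -- allowed.contains m = (access m && rank m ≤ t)
  have hallow : ∀ m : String, allowed.contains m = (pvRank.contains m && decide (pvRank.getD m 0 ≤ t)) := by
    intro m
    by_cases hm : pvRank.contains m = true
    · rcases hval m hm with ⟨h, hv⟩ | ⟨h, hv⟩ | ⟨h, hv⟩
      · subst h; rw [hm, hv, hpub]; simp
      · subst h; rw [hm, hv, hpro]; simp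
      · subst h; rw [hm, hv, hpri]; simp
    · have hm' : pvRank.contains m = false := Bool.eq_false_iff.2 hm
      have hand := hm'
      rw [pvRank_contains] at hand
      simp only [Bool.or_eq_false_iff, beq_eq_false_iff_ne] at hand
      rw [hoth m hand.1.1 hand.1.2 hand.2, hm']
      simp
  by_cases hacc : l.any (fun m => pvRank.contains m) = true
  · -- some access modifier present
    obtain ⟨m0, hm0l, hm0⟩ := List.any_eq_true.1 hacc
    have hacc' : l.any (fun m => (["public", "protected", "private"] : List String).contains m) = true := by
      refine List.any_eq_true.2 ⟨m0, hm0l, ?_⟩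
      rw [pvAccList_eq]; exact hm0
    rw [hacc', Bool.not_true]
    have hr0 : pvRank.getD m0 0 ∈ (l.filter (fun m => pvRank.contains m)).map (fun m => pvRank.getD m 0) :=
      List.mem_map.2 ⟨m0, List.mem_filter.2 ⟨hm0l, hm0⟩, rfl⟩
    obtain ⟨r, hr⟩ : ∃ r, PySem.List.min? ((l.filter (fun m => pvRank.contains m)).map (fun m => pvRank.getD m 0)) (fun x => x) = some r := by
      cases h : PySem.List.min? ((l.filter (fun m => pvRank.contains m)).map (fun m => pvRank.getD m 0)) (fun x => x) with
      | none => rw [PySem.List.min?_eq_none_iff] at h; rw [h] at hr0; simp at hr0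
      | some r => exact ⟨r, rfl⟩
    have hrmem := PySem.List.min?_mem hr
    have hrmin := PySem.List.min?_isMin hr
    rw [hr]
    simp only [Option.getD_some]
    -- LHS = l.any allowed.contains ; show it equals decide (r ≤ t)
    by_cases hle : r ≤ t
    · -- r ≤ t : some member of l is allowed
      obtain ⟨m1, hm1f, hm1v⟩ := List.mem_map.1 hrmem
      have hm1l := (List.mem_filter.1 hm1f).1
      have hm1a := (List.mem_filter.1 hm1f).2
      have : l.any (fun modifier => allowed.contains modifier) = true := by
        refine List.any_eq_true.2 ⟨m1, hm1l, ?_⟩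
        rw [hallow m1, hm1a, hm1v]
        simp [hle]
      rw [this]
      simp [hle]
    · -- t < r : nothing allowed
      have : l.any (fun modifier => allowed.contains modifier) = false := by
        rw [List.any_eq_false]
        intro m hm
        rw [hallow m]
        by_cases ha : pvRank.contains m = true
        · have : r ≤ pvRank.getD m 0 :=
            hrmin _ (List.mem_map.2 ⟨m, List.mem_filter.2 ⟨hm, ha⟩, rfl⟩)
          simp [ha]
          omega
        · simp [Bool.eq_false_iff.2 ha]
      rw [this]
      simp [hle]
  · -- no access modifier present
    have hno : ∀ m ∈ l, pvRank.contains m = false := fun m hm =>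
      Bool.eq_false_iff.2 (List.any_eq_false.1 (Bool.eq_false_iff.2 hacc) m hm)
    have hacc' : l.any (fun m => (["public", "protected", "private"] : List String).contains m) = false := by
      rw [List.any_eq_false]
      intro m hm
      rw [pvAccList_eq, hno m hm]
      simp
    have hnone : l.any (fun modifier => allowed.contains modifier) = false := by
      rw [List.any_eq_false]
      intro m hm
      rw [hallow m, hno m hm]
      simp
    have hfilt : l.filter (fun m => pvRank.contains m) = [] := by
      rw [List.filter_eq_nil_iff]
      intro m hm
      rw [hno m hm]
      simp
    rw [hnone, hacc', hfilt]
    show allowed.contains "protected" = decide ((2 : Int) ≤ t)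
    exact hpro

-- ===== VERDICT (by name: the statement is the Claim_ definition above) =====
theorem is_in_scope_py_spec : Claim_equal_is_in_scope_py := by
  intro modifiers scope _
  unfold Spec_is_in_scope_py is_in_scope_py is_in_scope_py_alt
  by_cases hall : scope == "all"
  · simp [hall]
  · rw [Bool.eq_false_iff.2 hall]
    simp only [Bool.false_eq_true, if_false]
    show _ = decide ((PySem.List.min? ((modifiers.filter (fun m => pvRank.contains m)).map (fun m => pvRank.getD m 0)) (fun x => x)).getD 2 ≤ pvRank.getD scope 3)
    by_cases h1 : scope = "public"
    · subst h1
      have hg : (PySem.Dict.ofList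
          [("public", ["public"]), ("protected", ["public", "protected"]),
           ("private", ["public", "protected", "private"])]).getD "public" ["public", "protected", "private"] = ["public"] := by decide
      have hr : pvRank.getD "public" 3 = 1 := by decide
      rw [hg, hr]
      exact pvKey 1 ["public"] (by decide) (by decide) (by decide)
        (by intro m hm _ _; simp [List.contains_eq_mem, hm]) modifiers
    · by_cases h2 : scope = "protected"
      · subst h2
        have hg : (PySem.Dict.ofList
            [("public", ["public"]), ("protected", ["public", "protected"]),
             ("private", ["public", "protected", "private"])]).getD "protected" ["public", "protected", "private"] = ["public", "protected"] := by decide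
        have hr : pvRank.getD "protected" 3 = 2 := by decide
        rw [hg, hr]
        exact pvKey 2 ["public", "protected"] (by decide) (by decide) (by decide)
          (by intro m hm hm2 _; simp [List.contains_eq_mem, hm, hm2]) modifiers
      · by_cases h3 : scope = "private"
        · subst h3
          have hg : (PySem.Dict.ofList
              [("public", ["public"]), ("protected", ["public", "protected"]),
               ("private", ["public", "protected", "private"])]).getD "private" ["public", "protected", "private"] = ["public", "protected", "private"] := by decide
          have hr : pvRank.getD "private" 3 = 3 := by decide
          rw [hg, hr]
          exact pvKey 3 ["public", "protected", "private"] (by decide) (by decide) (by decide)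
            (by intro m hm hm2 hm3; simp [List.contains_eq_mem, hm, hm2, hm3]) modifiers
        · -- unknown scope
          have hg : (PySem.Dict.ofList
              [("public", ["public"]), ("protected", ["public", "protected"]),
               ("private", ["public", "protected", "private"])]).getD scope ["public", "protected", "private"] = ["public", "protected", "private"] := by
            apply PySem.Dict.getD_of_not_contains
            have : PySem.Dict.ofList
                [("public", ["public"]), ("protected", ["public", "protected"]),
                 ("private", ["public", "protected", "private"])] = PySem.Dict.mk
                [("public", ["public"]), ("protected", ["public", "protected"]),
                 ("private", ["public", "protected", "private"])] := by decide
            rw [this]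
            simp [PySem.Dict.contains_mk]
            exact ⟨fun h => h1 h.symm, fun h => h2 h.symm, fun h => h3 h.symm⟩
          have hr : pvRank.getD scope 3 = 3 := by
            apply PySem.Dict.getD_of_not_contains
            rw [pvRank_contains]
            simp [h1, h2, h3]
          rw [hg, hr]
          exact pvKey 3 ["public", "protected", "private"] (by decide) (by decide) (by decide)
            (by intro m hm hm2 hm3; simp [List.contains_eq_mem, hm, hm2, hm3]) modifiers
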